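-- pv_equiv track=rewrite | github.com/raeez/chiral-bar-cobar | compute/lib/bc_quantum_group_roots_engine.py | classical_dim_g2
-- ===== SOURCE A (Python) =====
-- def classical_dim_g2(a: int, b: int) -> int:
--     """Classical dimension of V(a,b) for G_2.
--
--     Uses the Weyl dimension formula with the positive coroots in simple coroot
--     coordinates: (1,0), (0,1), (3,1), (3,2), (1,1), (2,1).
--     (Bourbaki convention: alpha_1 long, alpha_2 short.)
--
--     V(1,0) = 14-dimensional adjoint, V(0,1) = 7-dimensional fundamental.
--     """
--     lr = (a + 1, b + 1)
--     rho_vals = [1, 1, 4, 5, 2, 3]  # <rho, beta^vee> for each coroot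
--     coroots = [(1, 0), (0, 1), (3, 1), (3, 2), (1, 1), (2, 1)]
--
--     num = 1
--     den = 1
--     for cv, rv in zip(coroots, rho_vals):
--         inner = lr[0] * cv[0] + lr[1] * cv[1]
--         num *= inner
--         den *= rv
--     return num // den
-- ===== SOURCE B (Python) =====
-- # Evaluates the expanded degree-6 Weyl dimension polynomial from a coefficient table
-- # by nested Horner recurrences (in b, then a), then one floor division by 120.
-- COEFFS = [
--     [0, 0, 0, 0, 18, 18],
--     [0, 0, 0, 45, 180, 135],
--     [0, 0, 40, 300, 660, 400],
--     [0, 15, 180, 720, 1140, 585],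
--     [2, 40, 260, 740, 940, 422],
--     [2, 25, 120, 275, 298, 120],
-- ]
--
-- def classical_dim_g2(a: int, b: int) -> int:
--     p = 0
--     for row in COEFFS:
--         c = 0
--         for k in row:
--             c = c * b + k
--         p = p * a + c
--     return p // 120
-- ===== Notes on version B (the rewrite author's own statement) =====
-- stated objective: alternative
-- what changed: Instead of multiplying the six Weyl inner products (A's factored numerator/denominator loop), B stores the fully expanded bivariate polynomial 120*dim as a 6x6 coefficient table and evaluates it by nested Horner recurrences (inner Horner in b per row, outer Horner in a), then floor-divides once by 120.
import Mathlib
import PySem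

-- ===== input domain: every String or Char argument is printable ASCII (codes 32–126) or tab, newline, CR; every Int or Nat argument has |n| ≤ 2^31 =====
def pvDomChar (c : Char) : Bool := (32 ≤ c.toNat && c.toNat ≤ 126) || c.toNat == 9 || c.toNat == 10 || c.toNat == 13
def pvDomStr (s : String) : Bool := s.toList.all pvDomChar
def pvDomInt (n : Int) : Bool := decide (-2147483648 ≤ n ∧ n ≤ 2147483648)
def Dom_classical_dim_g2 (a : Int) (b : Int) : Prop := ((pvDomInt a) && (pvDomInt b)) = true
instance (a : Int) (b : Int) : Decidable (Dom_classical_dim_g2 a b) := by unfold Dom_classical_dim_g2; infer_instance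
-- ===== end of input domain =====

-- B evaluates the expanded dimension polynomial from a coefficient table by nested
-- Horner recurrences instead of multiplying A's six inner products (alternative).

-- ===== PORT A =====
-- literal port: lr, the two tables, the zip loop accumulating num and den, final floor division
def classical_dim_g2 (a : Int) (b : Int) : Int :=
  let lr : Int × Int := (a + 1, b + 1)
  let rho_vals : List Int := [1, 1, 4, 5, 2, 3]
  let coroots : List (Int × Int) := [(1, 0), (0, 1), (3, 1), (3, 2), (1, 1), (2, 1)]
  let nd := (List.zip coroots rho_vals).foldl
    (fun (s : Int × Int) (p : (Int × Int) × Int) =>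
      let inner := lr.1 * p.1.1 + lr.2 * p.1.2
      (s.1 * inner, s.2 * p.2)) (1, 1)
  PySem.Int.floordiv nd.1 nd.2

-- ===== PORT B =====
-- coefficient table of 120*dim, rows = powers of a (descending), entries = powers of b (descending)
def g2Coeffs : List (List Int) :=
  [[0, 0, 0, 0, 18, 18],
   [0, 0, 0, 45, 180, 135],
   [0, 0, 40, 300, 660, 400],
   [0, 15, 180, 720, 1140, 585],
   [2, 40, 260, 740, 940, 422],
   [2, 25, 120, 275, 298, 120]]

def classical_dim_g2_alt (a : Int) (b : Int) : Int :=
  let p := g2Coeffs.foldl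
    (fun (p : Int) (row : List Int) =>
      let c := row.foldl (fun (c : Int) (k : Int) => c * b + k) 0
      p * a + c) 0
  PySem.Int.floordiv p 120

-- ===== PRECONDITION & SPEC =====
def Spec_classical_dim_g2 (a : Int) (b : Int) (out : Int) : Prop := out = classical_dim_g2_alt a b
instance (a : Int) (b : Int) (out : Int) : Decidable (Spec_classical_dim_g2 a b out) := by unfold Spec_classical_dim_g2; infer_instance

-- ===== CLAIM (what is proved, stated in full; the proofs are below) =====
def Claim_equal_classical_dim_g2 : Prop := ∀ (a : Int) (b : Int), Dom_classical_dim_g2 a b → Spec_classical_dim_g2 a b (classical_dim_g2 a b)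

-- ===== LEMMAS AND PROOFS =====

-- ===== VERDICT (by name: the statement is the Claim_ definition above) =====
theorem classical_dim_g2_spec : Claim_equal_classical_dim_g2 := by
  intro a b _
  show classical_dim_g2 a b = classical_dim_g2_alt a b
  simp only [classical_dim_g2, classical_dim_g2_alt, g2Coeffs, List.zip, List.zipWith,
    List.foldl]
  congr 1
  ring
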